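-- pv_equiv track=rewrite | github.com/zestsoftware/xm.charting | xm/charting/gantt.py | make_id
-- ===== SOURCE A (Python) =====
-- def make_id(text):
--     s = ''
--     for x in text:
--         if x.isalpha():
--             s += x.lower()
--         elif x.isdigit():
--             s += x
--         elif not s.endswith('-'):
--             s += '-'
--
--     if s.endswith('-'):
--         s = s[:-1]
--
--     return s
-- ===== SOURCE B (Python) =====
-- def make_id(text):
--     # Phase 1: stateless per-character mapping (lower letters, keep digits, dash otherwise).
--     mapped = ''.join(c.lower() if c.isalpha() else c if c.isdigit() else '-' for c in text)
--     # Phase 2: collapse dash runs by keeping a dash only when its predecessor is not a dash.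
--     kept = [c for p, c in zip('x' + mapped, mapped) if c != '-' or p != '-']
--     # Drop a single trailing dash (the collapse pass guarantees there is at most one).
--     if kept and kept[-1] == '-':
--         kept.pop()
--     return ''.join(kept)
-- ===== Notes on version B (the rewrite author's own statement) =====
-- stated objective: alternative
-- what changed: A's single stateful loop (append a separator or suppress it based on the accumulated string's last character) is replaced by a stateless per-char map phase plus a separate adjacency filter over zip(prev, cur) that collapses separator runs, then a single trailing-separator pop.
import Mathlib
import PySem

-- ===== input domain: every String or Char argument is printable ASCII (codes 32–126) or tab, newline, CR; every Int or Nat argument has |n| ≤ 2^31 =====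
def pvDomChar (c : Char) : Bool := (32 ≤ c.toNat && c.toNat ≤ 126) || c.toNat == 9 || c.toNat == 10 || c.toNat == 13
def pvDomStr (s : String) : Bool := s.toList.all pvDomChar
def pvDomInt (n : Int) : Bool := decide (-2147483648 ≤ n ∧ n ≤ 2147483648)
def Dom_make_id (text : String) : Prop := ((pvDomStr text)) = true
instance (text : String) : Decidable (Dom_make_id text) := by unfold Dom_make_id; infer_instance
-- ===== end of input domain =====

-- B replaces A's single stateful suppress-as-you-go loop by a stateless map phase plus an
-- adjacency filter (zip with the predecessor) that collapses dash runs; objective: alternative.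

-- ===== PORT A =====
-- literal transliteration of A: accumulate s char by char, suppressing a dash after a dash,
-- then strip one trailing dash with s[:-1]
def make_id (text : String) : String :=
  let s := text.toList.foldl (fun s x =>
    if PySem.Chars.isalpha x then s ++ [PySem.Chars.lowerChar x]
    else if PySem.Chars.isdigit x then s ++ [x]
    else if PySem.Chars.endswith s ['-'] = false then s ++ ['-'] else s) []
  let s := if PySem.Chars.endswith s ['-'] then PySem.Chars.slice s none (some (-1)) else s
  String.mk s

-- ===== PORT B =====
-- literal transliteration of Source B: map every char, keep a dash only when the previous mapped
-- char (sentinel 'x' in front) is not a dash, drop a single trailing dash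
def make_id_alt (text : String) : String :=
  let mapped := text.toList.map (fun c =>
    if PySem.Chars.isalpha c then PySem.Chars.lowerChar c
    else if PySem.Chars.isdigit c then c else '-')
  let kept := ((('x' :: mapped).zip mapped).filter
      (fun pc => pc.2 != '-' || pc.1 != '-')).map (·.2)
  let kept := if kept ≠ [] ∧ PySem.List.pyGet? kept (-1) = some '-' then kept.dropLast else kept
  String.mk kept

-- ===== PRECONDITION & SPEC =====
def Spec_make_id (text : String) (out : String) : Prop := out = make_id_alt text
instance (text : String) (out : String) : Decidable (Spec_make_id text out) := by unfold Spec_make_id; infer_instance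

-- ===== CLAIM (what is proved, stated in full; the proofs are below) =====
def Claim_equal_make_id : Prop := ∀ (text : String), Dom_make_id text → Spec_make_id text (make_id text)

-- ===== LEMMAS AND PROOFS =====

-- the per-character mapping both programs apply
def pvMap (c : Char) : Char :=
  if PySem.Chars.isalpha c then PySem.Chars.lowerChar c
  else if PySem.Chars.isdigit c then c else '-'

-- collapse of dash runs, carrying the previous mapped char
def pvCollapse (p : Char) : List Char → List Char
  | [] => []
  | c :: r => (if c = '-' ∧ p = '-' then [] else [c]) ++ pvCollapse c r

theorem pvChar_le_toNat {a b : Char} (h : a ≤ b) : a.toNat ≤ b.toNat := Fin.mk_le_mk.mp h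

theorem pvMap_ne_dash (c : Char)
    (h : PySem.Chars.isalpha c = true ∨ PySem.Chars.isdigit c = true) :
    pvMap c ≠ '-' := by
  intro hEq
  have h45 : (pvMap c).toNat = 45 := by rw [hEq]; decide
  unfold pvMap at h45
  by_cases ha : PySem.Chars.isalpha c = true
  · rw [if_pos ha] at h45
    have ha' := ha
    simp only [PySem.Chars.isalpha, PySem.Chars.isupper, PySem.Chars.islower,
      Bool.or_eq_true, Bool.and_eq_true, decide_eq_true_eq] at ha'
    unfold PySem.Chars.lowerChar at h45
    have hAn : ('A').toNat = 65 := by decide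
    have hZn : ('Z').toNat = 90 := by decide
    have han : ('a').toNat = 97 := by decide
    rcases ha' with ⟨h1, h2⟩ | ⟨h1, h2⟩
    · have h1' := pvChar_le_toNat h1; have h2' := pvChar_le_toNat h2
      rw [if_pos (by simp [PySem.Chars.isupper, h1, h2])] at h45
      rw [Char.toNat_ofNat, if_pos (Or.inl (by omega))] at h45
      omega
    · have h1' := pvChar_le_toNat h1
      by_cases hu : PySem.Chars.isupper c = true
      · simp only [PySem.Chars.isupper, Bool.and_eq_true, decide_eq_true_eq] at hu
        have h2' := pvChar_le_toNat hu.2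
        omega
      · rw [if_neg hu] at h45; omega
  · rw [if_neg ha] at h45
    have hd : PySem.Chars.isdigit c = true := h.resolve_left ha
    rw [if_pos hd] at h45
    simp only [PySem.Chars.isdigit, Bool.and_eq_true, decide_eq_true_eq] at hd
    have h1' := pvChar_le_toNat hd.1
    have h0n : ('0').toNat = 48 := by decide
    omega

theorem endswith_append_singleton (s : List Char) (a : Char) :
    PySem.Chars.endswith (s ++ [a]) ['-'] = (a == '-') := by
  by_cases h : a = '-'
  · subst h
    rw [(PySem.Chars.endswith_iff _ _).mpr (List.suffix_append s ['-'])]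
    simp
  · have hne : ¬ PySem.Chars.endswith (s ++ [a]) ['-'] = true := by
      rw [PySem.Chars.endswith_iff]
      rintro ⟨t, ht⟩
      have h1 : (t ++ ['-']).getLast? = some '-' := by simp
      rw [ht] at h1
      simp at h1
      exact h h1
    simp only [Bool.not_eq_true] at hne
    rw [hne]
    simp [h]

-- A's loop from accumulator s equals s ++ collapse of the mapped remainder,
-- where the carried prev char p matches s's trailing-dash state
theorem loopA_eq (cs : List Char) : ∀ (s : List Char) (p : Char),
    PySem.Chars.endswith s ['-'] = (p == '-') →
    cs.foldl (fun s x =>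
      if PySem.Chars.isalpha x then s ++ [PySem.Chars.lowerChar x]
      else if PySem.Chars.isdigit x then s ++ [x]
      else if PySem.Chars.endswith s ['-'] = false then s ++ ['-'] else s) s
    = s ++ pvCollapse p (cs.map pvMap) := by
  induction cs with
  | nil => intro s p _; simp [pvCollapse]
  | cons c r ih =>
    intro s p hp
    simp only [List.foldl_cons, List.map_cons]
    by_cases ha : PySem.Chars.isalpha c = true
    · have hne : pvMap c ≠ '-' := pvMap_ne_dash c (Or.inl ha)
      have hm : pvMap c = PySem.Chars.lowerChar c := by simp [pvMap, ha]
      rw [if_pos ha, ih (s ++ [PySem.Chars.lowerChar c]) (pvMap c)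
        (by rw [endswith_append_singleton, hm])]
      rw [pvCollapse, if_neg (fun hc => hne hc.1), hm]
      simp
    · by_cases hd : PySem.Chars.isdigit c = true
      · have hne : pvMap c ≠ '-' := pvMap_ne_dash c (Or.inr hd)
        have hm : pvMap c = c := by simp [pvMap, ha, hd]
        rw [if_neg ha, if_pos hd, ih (s ++ [c]) (pvMap c)
          (by rw [endswith_append_singleton, hm])]
        rw [pvCollapse, if_neg (fun hc => hne hc.1), hm]
        simp
      · have hm : pvMap c = '-' := by simp [pvMap, ha, hd]
        rw [if_neg ha, if_neg hd]
        by_cases hb : PySem.Chars.endswith s ['-'] = false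
        · have hp' : ¬ p = '-' := by
            intro h; rw [h] at hp; simp at hp; simp [hp] at hb
          rw [if_pos hb, ih (s ++ ['-']) '-' (by rw [endswith_append_singleton])]
          simp [pvCollapse, hm, hp']
        · have hb' : PySem.Chars.endswith s ['-'] = true := by simpa using hb
          have hp' : p = '-' := by
            rw [hb'] at hp; exact (beq_iff_eq.mp hp.symm)
          rw [if_neg hb, ih s '-' (by rw [hb']; simp)]
          simp [pvCollapse, hm, hp']

-- B's zip-filter-map equals the same collapse
theorem zipFilter_eq (m : List Char) : ∀ (p : Char),
    (((p :: m).zip m).filter (fun pc => pc.2 != '-' || pc.1 != '-')).map (·.2)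
    = pvCollapse p m := by
  induction m with
  | nil => intro p; simp [pvCollapse]
  | cons c r ih =>
    intro p
    have hz : (p :: c :: r).zip (c :: r) = (p, c) :: ((c :: r).zip r) := by
      simp [List.zip]
    rw [hz]
    by_cases h : c = '-' ∧ p = '-'
    · simp only [pvCollapse, if_pos h, List.nil_append]
      rw [List.filter_cons_of_neg (by simp [h.1, h.2])]
      exact ih c
    · simp only [pvCollapse, if_neg h, List.singleton_append]
      rw [List.filter_cons_of_pos (by
        by_cases hc : c = '-'
        · have hp : ¬ p = '-' := fun hp => h ⟨hc, hp⟩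
          simp [hc, hp]
        · simp [hc])]
      simp only [List.map_cons]
      rw [ih c]

-- the two trailing-dash removals agree on any list
theorem strip_eq (r : List Char) :
    (if PySem.Chars.endswith r ['-'] then PySem.Chars.slice r none (some (-1)) else r)
    = (if r ≠ [] ∧ PySem.List.pyGet? r (-1) = some '-' then r.dropLast else r) := by
  by_cases hE : PySem.Chars.endswith r ['-'] = true
  · have hsuf : ['-'] <:+ r := (PySem.Chars.endswith_iff r ['-']).mp hE
    obtain ⟨t, ht⟩ := hsuf
    have hne : r ≠ [] := by rw [← ht]; simp
    have hlast : PySem.List.pyGet? r (-1) = some '-' := by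
      rw [PySem.List.pyGet?_neg_one, ← ht]
      simp
    rw [if_pos hE, if_pos ⟨hne, hlast⟩]
    simp [PySem.Chars.slice_eq_listSlice, PySem.List.slice_to_neg_one]
  · rw [if_neg hE]
    rw [if_neg]
    rintro ⟨hne, hlast⟩
    rw [PySem.List.pyGet?_neg_one] at hlast
    apply hE
    rw [PySem.Chars.endswith_iff]
    obtain ⟨t, hlt⟩ := List.getLast?_eq_some_iff.mp hlast
    exact ⟨t, by simpa using hlt.symm⟩

-- ===== VERDICT (by name: the statement is the Claim_ definition above) =====
theorem make_id_spec : Claim_equal_make_id := by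
  intro text _
  unfold Spec_make_id make_id make_id_alt
  have hmfun : (fun c =>
      if PySem.Chars.isalpha c = true then PySem.Chars.lowerChar c
      else if PySem.Chars.isdigit c = true then c else '-') = pvMap := by
    funext c; simp [pvMap]
  have hA := loopA_eq text.toList [] 'x' (by decide)
  simp only [List.nil_append] at hA
  have hB := zipFilter_eq (text.toList.map pvMap) 'x'
  simp only [hmfun, hA, hB, strip_eq]
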